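-- pv_equiv track=rewrite | github.com/sashaperigo/gedcom-tools | purge_duplicate_events.py | _apply_block_changes
-- ===== SOURCE A (Python) =====
-- def _apply_block_changes(
--     rec_lines: list[str],
--     block_spans: list[tuple[int, int]],
--     to_remove: set[int],
--     replacements: dict[int, list[str]],
-- ) -> list[str]:
--     """Reconstruct rec_lines, skipping removed blocks and splicing in replacements."""
--     block_starts = {start: i for i, (start, _) in enumerate(block_spans)}
--     block_end_map = {start: end for start, end in block_spans}
--     new_rec: list[str] = []
--     i = 0
--     while i < len(rec_lines):
--         if i in block_starts:
--             bidx = block_starts[i]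
--             end = block_end_map[i]
--             if bidx in to_remove:
--                 pass  # skip the duplicate block
--             elif bidx in replacements:
--                 new_rec.extend(replacements[bidx])
--             else:
--                 new_rec.extend(rec_lines[i:end])
--             i = end
--         else:
--             new_rec.append(rec_lines[i])
--             i += 1
--     return new_rec
-- ===== SOURCE B (Python) =====
-- def _apply_block_changes(
--     rec_lines: list[str],
--     block_spans: list[tuple[int, int]],
--     to_remove: set[int],
--     replacements: dict[int, list[str]],
-- ) -> list[str]:
--     """Reconstruct rec_lines block by block: map each start to its block, then walk the
--     starts in order with a cursor, copying the untouched gaps as whole slices."""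
--     spans = {start: (i, end) for i, (start, end) in enumerate(block_spans)}
--     new_rec: list[str] = []
--     cursor = 0
--     for start in sorted(spans):
--         if start < cursor or start >= len(rec_lines):
--             continue
--         bidx, end = spans[start]
--         new_rec.extend(rec_lines[cursor:start])
--         if bidx in to_remove:
--             pass
--         elif bidx in replacements:
--             new_rec.extend(replacements[bidx])
--         else:
--             new_rec.extend(rec_lines[start:end])
--         cursor = end
--     new_rec.extend(rec_lines[cursor:])
--     return new_rec
-- ===== Notes on version B (the rewrite author's own statement) =====
-- stated objective: alternative
-- what changed: Replaces A's per-line index scan driven by two start-keyed dicts with a block-driven pass: one start->(bidx,end) dict built once, blocks visited in sorted start order with a cursor, and untouched gaps copied as whole slices; Pre_ excludes spans whose start is inside the record but whose end <= start, on which A loops forever or raises IndexError or re-emits already-output lines by jumping the index backwards.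
import Mathlib
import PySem

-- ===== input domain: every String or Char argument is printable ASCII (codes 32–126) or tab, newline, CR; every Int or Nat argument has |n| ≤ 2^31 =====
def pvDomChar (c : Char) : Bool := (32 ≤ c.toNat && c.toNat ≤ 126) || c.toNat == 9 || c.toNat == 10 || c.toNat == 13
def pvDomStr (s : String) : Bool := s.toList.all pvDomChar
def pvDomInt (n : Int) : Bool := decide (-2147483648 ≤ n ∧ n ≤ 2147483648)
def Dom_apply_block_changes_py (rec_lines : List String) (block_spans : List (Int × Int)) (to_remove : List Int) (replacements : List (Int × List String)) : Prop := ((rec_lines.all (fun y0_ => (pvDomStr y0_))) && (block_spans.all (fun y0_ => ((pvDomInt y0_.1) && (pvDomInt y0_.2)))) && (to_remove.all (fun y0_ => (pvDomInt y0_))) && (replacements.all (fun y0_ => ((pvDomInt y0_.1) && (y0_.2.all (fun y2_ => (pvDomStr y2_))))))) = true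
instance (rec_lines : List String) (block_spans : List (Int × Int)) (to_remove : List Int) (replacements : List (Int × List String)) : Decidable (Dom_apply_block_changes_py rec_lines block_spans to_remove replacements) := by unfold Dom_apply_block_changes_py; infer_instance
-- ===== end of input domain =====

-- B rebuilds the record block-by-block (one start→(bidx,end) dict, blocks in sorted start
-- order, gaps copied as whole slices) instead of A's line-by-line index scan; alternative
-- decomposition, same cost.

-- ===== PORT A =====
-- block_starts = {start: i for i, (start, _) in enumerate(block_spans)}
def pvStarts (block_spans : List (Int × Int)) : PySem.Dict Int Int :=
  (PySem.List.enumerate block_spans 0).foldl (fun d p => d.insert p.2.1 p.1) PySem.Dict.empty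

-- block_end_map = {start: end for start, end in block_spans}
def pvEnds (block_spans : List (Int × Int)) : PySem.Dict Int Int :=
  block_spans.foldl (fun d p => d.insert p.1 p.2) PySem.Dict.empty

-- the while-loop of A; fuel only makes the recursion total (Python raises/diverges
-- exactly where the fuel could matter, outside Pre_)
def pvLoopA (lines : List String) (dS dE : PySem.Dict Int Int) (rm : List Int)
    (repl : List (Int × List String)) : Nat → Int → List String → List String
  | 0, _, acc => acc
  | fuel+1, i, acc =>
    if i < (lines.length : Int) then
      match dS.get? i with
      | some bidx =>
        match dE.get? i with
        | some e =>
          pvLoopA lines dS dE rm repl fuel e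
            (if rm.contains bidx then acc
             else match List.lookup bidx repl with
               | some r => acc ++ r
               | none => acc ++ PySem.List.slice lines (some i) (some e))
        | none => acc   -- unreachable: dS and dE are keyed by the same starts
      | none =>
        match PySem.List.pyGet? lines i with
        | some x => pvLoopA lines dS dE rm repl fuel (i+1) (acc ++ [x])
        | none => acc   -- IndexError (only reachable outside Pre_)
    else acc

def apply_block_changes_py (rec_lines : List String) (block_spans : List (Int × Int)) (to_remove : List Int) (replacements : List (Int × List String)) : List String :=
  pvLoopA rec_lines (pvStarts block_spans) (pvEnds block_spans) to_remove replacements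
    (rec_lines.length + 1) 0 []

-- ===== PORT B =====
-- spans = {start: (i, end) for i, (start, end) in enumerate(block_spans)}
def pvSpans (block_spans : List (Int × Int)) : PySem.Dict Int (Int × Int) :=
  (PySem.List.enumerate block_spans 0).foldl
    (fun d p => d.insert p.2.1 (p.1, p.2.2)) PySem.Dict.empty

-- the for-loop of B over the sorted starts, carrying (cursor, new_rec)
def pvLoopB (lines : List String) (d : PySem.Dict Int (Int × Int)) (rm : List Int)
    (repl : List (Int × List String)) : List Int → Int → List String → List String
  | [], cursor, acc => acc ++ PySem.List.slice lines (some cursor) none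
  | s :: ks, cursor, acc =>
    if s < cursor ∨ (lines.length : Int) ≤ s then
      pvLoopB lines d rm repl ks cursor acc
    else
      match d.get? s with
      | some (bidx, e) =>
        pvLoopB lines d rm repl ks e
          (acc ++ PySem.List.slice lines (some cursor) (some s) ++
           (if rm.contains bidx then []
            else match List.lookup bidx repl with
              | some r => r
              | none => PySem.List.slice lines (some s) (some e)))
      | none => pvLoopB lines d rm repl ks cursor acc   -- unreachable: s is a key of d

def apply_block_changes_py_alt (rec_lines : List String) (block_spans : List (Int × Int)) (to_remove : List Int) (replacements : List (Int × List String)) : List String :=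
  pvLoopB rec_lines (pvSpans block_spans) to_remove replacements
    (PySem.List.sorted (pvSpans block_spans).keys (fun k => k) false) 0 []

-- ===== PRECONDITION & SPEC =====
-- Pre_ excludes spans whose start lies inside rec_lines but whose end ≤ start: on them A's
-- index jump goes backwards or stalls, so A loops forever or raises IndexError, and where it
-- happens to return, the re-emission of already-output lines is an accident of the jump order.
def Pre_apply_block_changes_py (rec_lines : List String) (block_spans : List (Int × Int)) (to_remove : List Int) (replacements : List (Int × List String)) : Prop :=
  ∀ p ∈ block_spans, 0 ≤ p.1 → p.1 < (rec_lines.length : Int) → p.1 < p.2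
instance (rec_lines : List String) (block_spans : List (Int × Int)) (to_remove : List Int) (replacements : List (Int × List String)) : Decidable (Pre_apply_block_changes_py rec_lines block_spans to_remove replacements) := by unfold Pre_apply_block_changes_py; infer_instance

def pvWitness_apply_block_changes_py : List String × (List (Int × Int)) × List Int × (List (Int × List String)) :=
  (["0 @I1@ INDI", "1 BIRT", "2 DATE 1900", "1 NAME X"], [((1 : Int), (3 : Int))], [], [((0 : Int), ["1 BIRT", "2 DATE 1901"])])

def Spec_apply_block_changes_py (rec_lines : List String) (block_spans : List (Int × Int)) (to_remove : List Int) (replacements : List (Int × List String)) (out : List String) : Prop := out = apply_block_changes_py_alt rec_lines block_spans to_remove replacements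
instance (rec_lines : List String) (block_spans : List (Int × Int)) (to_remove : List Int) (replacements : List (Int × List String)) (out : List String) : Decidable (Spec_apply_block_changes_py rec_lines block_spans to_remove replacements out) := by unfold Spec_apply_block_changes_py; infer_instance

-- ===== CLAIM (what is proved, stated in full; the proofs are below) =====
def Claim_equal_apply_block_changes_py : Prop := ∀ (rec_lines : List String) (block_spans : List (Int × Int)) (to_remove : List Int) (replacements : List (Int × List String)), Dom_apply_block_changes_py rec_lines block_spans to_remove replacements → Pre_apply_block_changes_py rec_lines block_spans to_remove replacements → Spec_apply_block_changes_py rec_lines block_spans to_remove replacements (apply_block_changes_py rec_lines block_spans to_remove replacements)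

-- ===== LEMMAS AND PROOFS =====

-- proof-side characterisation of the three dicts: lookup = LAST listed span with that start
def pvFind (block_spans : List (Int × Int)) (k : Int) : Option (Int × Int × Int) :=
  (PySem.List.enumerate block_spans 0).reverse.find? (fun q => q.2.1 == k)

-- lookup in a dict built by a fold of inserts = last matching element of the source list
theorem pv_get?_foldl_insert {α β : Type} (key : α → Int) (val : α → β) (l : List α)
    (d : PySem.Dict Int β) (k : Int) :
    (l.foldl (fun d a => d.insert (key a) (val a)) d).get? k
      = match l.reverse.find? (fun a => key a == k) with
        | some a => some (val a)
        | none => d.get? k := by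
  induction l generalizing d with
  | nil => simp
  | cons a l ih =>
    simp only [List.foldl_cons, ih, List.reverse_cons, List.find?_append]
    cases h : l.reverse.find? (fun a => key a == k) with
    | some b => simp
    | none =>
      simp only [Option.none_or]
      by_cases hk : key a = k
      · subst hk; simp [PySem.Dict.get?_insert_self]
      · have hb : (key a == k) = false := by simp [hk]
        simp [List.find?, hb, PySem.Dict.get?_insert_of_ne d (val a) (Ne.symm hk)]

theorem pvStarts_get? (bs : List (Int × Int)) (k : Int) :
    (pvStarts bs).get? k = (pvFind bs k).map (·.1) := by
  unfold pvStarts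
  refine (pv_get?_foldl_insert (fun q : Int × Int × Int => q.2.1) (fun q => q.1)
    (PySem.List.enumerate bs 0) PySem.Dict.empty k).trans ?_
  unfold pvFind
  cases h : (PySem.List.enumerate bs 0).reverse.find? (fun q => q.2.1 == k) <;> simp [h]

theorem pvEnds_get? (bs : List (Int × Int)) (k : Int) :
    (pvEnds bs).get? k = (pvFind bs k).map (·.2.2) := by
  unfold pvEnds
  refine (pv_get?_foldl_insert (fun p : Int × Int => p.1) (fun p => p.2)
    bs PySem.Dict.empty k).trans ?_
  unfold pvFind
  have hmap : bs = (PySem.List.enumerate bs 0).map (·.2) := (PySem.List.map_snd_enumerate bs 0).symm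
  conv_lhs => rw [hmap]
  rw [← List.map_reverse, List.find?_map]
  have hcomp : ((fun a : Int × Int => a.1 == k) ∘ fun x : Int × (Int × Int) => x.2)
      = fun q : Int × (Int × Int) => q.2.1 == k := rfl
  rw [hcomp]
  cases h : (PySem.List.enumerate bs 0).reverse.find? (fun q : Int × (Int × Int) => q.2.1 == k) <;>
    simp [h]

theorem pvSpans_get? (bs : List (Int × Int)) (k : Int) :
    (pvSpans bs).get? k = (pvFind bs k).map (fun q => (q.1, q.2.2)) := by
  unfold pvSpans
  refine (pv_get?_foldl_insert (fun q : Int × Int × Int => q.2.1) (fun q => (q.1, q.2.2))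
    (PySem.List.enumerate bs 0) PySem.Dict.empty k).trans ?_
  unfold pvFind
  cases h : (PySem.List.enumerate bs 0).reverse.find? (fun q => q.2.1 == k) <;> simp [h]

theorem pvFind_mem (bs : List (Int × Int)) (k : Int) (q : Int × Int × Int)
    (h : pvFind bs k = some q) : q.2 ∈ bs ∧ q.2.1 = k := by
  unfold pvFind at h
  have hp := List.find?_some h
  have hm := List.mem_of_find?_eq_some h
  rw [List.mem_reverse] at hm
  refine ⟨?_, ?_⟩
  · have : q.2 ∈ (PySem.List.enumerate bs 0).map (·.2) := List.mem_map_of_mem hm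
    rwa [PySem.List.map_snd_enumerate] at this
  · exact by simpa using hp

theorem pvFind_isSome_iff (bs : List (Int × Int)) (k : Int) :
    (pvFind bs k).isSome = true ↔ k ∈ bs.map (·.1) := by
  constructor
  · intro h
    obtain ⟨q, hq⟩ := Option.isSome_iff_exists.mp h
    have hmem := pvFind_mem bs k q hq
    exact List.mem_map.mpr ⟨q.2, hmem.1, hmem.2⟩
  · intro h
    obtain ⟨p, hp, hpk⟩ := List.mem_map.mp h
    have hp2 : p ∈ (PySem.List.enumerate bs 0).map (·.2) := by
      rwa [PySem.List.map_snd_enumerate]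
    obtain ⟨q, hq, hq2⟩ := List.mem_map.mp hp2
    have : (pvFind bs k).isSome ↔ ∃ x ∈ (PySem.List.enumerate bs 0).reverse, x.2.1 == k := by
      unfold pvFind; exact List.find?_isSome
    refine this.mpr ⟨q, List.mem_reverse.mpr hq, ?_⟩
    simp [hq2, hpk]

theorem pvSpans_keys_mem (bs : List (Int × Int)) (k : Int) :
    k ∈ (pvSpans bs).keys ↔ k ∈ bs.map (·.1) := by
  unfold pvSpans
  rw [PySem.Dict.keys_foldl_insert_key, PySem.Set.mem_update]
  have hm : (PySem.List.enumerate bs 0).map (fun p : Int × Int × Int => p.2.1)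
      = bs.map (·.1) := by
    have : (PySem.List.enumerate bs 0).map (fun p : Int × Int × Int => p.2.1)
        = ((PySem.List.enumerate bs 0).map (·.2)).map (·.1) := by
      rw [List.map_map]; rfl
    rw [this, PySem.List.map_snd_enumerate]
  simp [hm]

theorem pvSpans_keys_nodup (bs : List (Int × Int)) : (pvSpans bs).keys.Nodup := by
  unfold pvSpans
  exact PySem.Dict.nodup_keys_foldl_insert_key _ _ _ _ PySem.Dict.nodup_keys_empty

-- every entry of pvLoopB's worklist below the cursor or past the record is skipped
theorem pvLoopB_skip (lines : List String) (d : PySem.Dict Int (Int × Int)) (rm : List Int)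
    (repl : List (Int × List String)) (ks : List Int) (cursor : Int) (acc : List String)
    (h : ∀ s ∈ ks, s < cursor ∨ (lines.length : Int) ≤ s) :
    pvLoopB lines d rm repl ks cursor acc = acc ++ PySem.List.slice lines (some cursor) none := by
  induction ks with
  | nil => simp [pvLoopB]
  | cons s ks ih =>
    have hs := h s (by simp)
    simp only [pvLoopB, if_pos hs]
    exact ih (fun t ht => h t (by simp [ht]))

theorem pvLoopB_skip_lt (lines : List String) (d : PySem.Dict Int (Int × Int)) (rm : List Int)
    (repl : List (Int × List String)) (pre ks : List Int) (cursor : Int) (acc : List String)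
    (h : ∀ s ∈ pre, s < cursor) :
    pvLoopB lines d rm repl (pre ++ ks) cursor acc = pvLoopB lines d rm repl ks cursor acc := by
  induction pre with
  | nil => rfl
  | cons s pre ih =>
    simp only [List.cons_append, pvLoopB, if_pos (Or.inl (h s (by simp)))]
    exact ih (fun t ht => h t (by simp [ht]))

-- slicing decompositions used when the cursor steps over one line
theorem pv_slice_from_cons (lines : List String) (c : Int) (x : String)
    (h0 : 0 ≤ c) (hc : c < (lines.length : Int)) (hx : lines[c.toNat]? = some x) :
    PySem.List.slice lines (some c) none = x :: PySem.List.slice lines (some (c+1)) none := by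
  rw [PySem.List.slice_from _ h0, PySem.List.slice_from _ (by omega)]
  have hlt : c.toNat < lines.length := by omega
  have : (c + 1).toNat = c.toNat + 1 := by omega
  rw [this, List.drop_eq_getElem_cons hlt]
  simp [List.getElem?_eq_getElem hlt] at hx
  simp [hx]

theorem pv_slice_between_cons (lines : List String) (c s : Int) (x : String)
    (h0 : 0 ≤ c) (hc : c < (lines.length : Int)) (hcs : c < s) (hx : lines[c.toNat]? = some x) :
    PySem.List.slice lines (some c) (some s) = x :: PySem.List.slice lines (some (c+1)) (some s) := by
  have hs0 : 0 ≤ s := by omega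
  rw [PySem.List.slice_toNat _ h0 hs0, PySem.List.slice_toNat _ (by omega) hs0]
  have hlt : c.toNat < lines.length := by omega
  have h1 : (c + 1).toNat = c.toNat + 1 := by omega
  have h2 : s.toNat - c.toNat = (s.toNat - (c + 1).toNat) + 1 := by omega
  rw [h1, List.drop_eq_getElem_cons hlt, h2, List.take_succ_cons]
  simp [List.getElem?_eq_getElem hlt] at hx
  simp [hx, h1]

-- stepping the cursor over a non-start line commutes with pvLoopB
theorem pvLoopB_advance (lines : List String) (d : PySem.Dict Int (Int × Int)) (rm : List Int)
    (repl : List (Int × List String)) (ks : List Int) (cursor : Int) (acc : List String)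
    (x : String) (h0 : 0 ≤ cursor) (hc : cursor < (lines.length : Int))
    (hx : lines[cursor.toNat]? = some x) (hne : ∀ s ∈ ks, s ≠ cursor) :
    pvLoopB lines d rm repl ks (cursor + 1) (acc ++ [x]) = pvLoopB lines d rm repl ks cursor acc := by
  induction ks generalizing acc with
  | nil =>
    simp only [pvLoopB, List.append_assoc]
    rw [pv_slice_from_cons lines cursor x h0 hc hx]
    rfl
  | cons s ks ih =>
    have hsne : s ≠ cursor := hne s (by simp)
    have hrest : ∀ t ∈ ks, t ≠ cursor := fun t ht => hne t (by simp [ht])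
    by_cases hskip : s < cursor ∨ (lines.length : Int) ≤ s
    · have hskip2 : s < cursor + 1 ∨ (lines.length : Int) ≤ s := by omega
      simp only [pvLoopB, if_pos hskip, if_pos hskip2]
      exact ih acc hrest
    · have hskip2 : ¬ (s < cursor + 1 ∨ (lines.length : Int) ≤ s) := by omega
      simp only [pvLoopB, if_neg hskip, if_neg hskip2]
      cases hM : d.get? s with
      | none => exact ih acc hrest
      | some p =>
        obtain ⟨bidx, e⟩ := p
        have hcs : cursor < s := by omega
        rw [pv_slice_between_cons lines cursor s x h0 hc hcs hx]
        simp [List.append_assoc]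

-- main invariant: A's index scan from `cursor` equals B's block walk over any strictly
-- increasing worklist of starts that contains every listed start ≥ cursor
theorem pv_main (lines : List String) (bs : List (Int × Int)) (rm : List Int)
    (repl : List (Int × List String))
    (hpre : ∀ p ∈ bs, 0 ≤ p.1 → p.1 < (lines.length : Int) → p.1 < p.2) :
    ∀ (fuel : Nat) (cursor : Int) (ks : List Int) (acc : List String),
    0 ≤ cursor →
    ks.Pairwise (· < ·) →
    (∀ k ∈ ks, (pvFind bs k).isSome) →
    (∀ k : Int, (pvFind bs k).isSome → cursor ≤ k → k ∈ ks) →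
    (((lines.length : Int) - cursor).toNat < fuel) →
    pvLoopA lines (pvStarts bs) (pvEnds bs) rm repl fuel cursor acc
      = pvLoopB lines (pvSpans bs) rm repl ks cursor acc := by
  intro fuel
  induction fuel with
  | zero => intro cursor ks acc _ _ _ _ hf; omega
  | succ f ih =>
    intro cursor ks acc h0 hsorted hks hcov hf
    by_cases hcn : cursor < (lines.length : Int)
    · cases hq : pvFind bs cursor with
      | some q =>
        obtain ⟨bidx, st, e⟩ := q
        have hmem := pvFind_mem bs cursor _ hq
        have hst : st = cursor := hmem.2
        rw [hst] at hq
        have hspan : (cursor, e) ∈ bs := by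
          have h2 := hmem.1
          rw [hst] at h2
          exact h2
        have hce : cursor < e := hpre _ hspan h0 hcn
        -- A takes the block branch
        have hA : pvLoopA lines (pvStarts bs) (pvEnds bs) rm repl (f+1) cursor acc
            = pvLoopA lines (pvStarts bs) (pvEnds bs) rm repl f e
              (if rm.contains bidx then acc
               else match List.lookup bidx repl with
                 | some r => acc ++ r
                 | none => acc ++ PySem.List.slice lines (some cursor) (some e)) := by
          simp only [pvLoopA, pvStarts_get?, pvEnds_get?, hq, Option.map_some, if_pos hcn]
        -- B reaches cursor at the head of its worklist
        have hcin : cursor ∈ ks := hcov cursor (by simp [hq]) le_rfl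
        obtain ⟨pre, post, hsplit⟩ := List.append_of_mem hcin
        subst hsplit
        have hpair := hsorted
        rw [List.pairwise_append] at hpair
        have hprelt : ∀ s ∈ pre, s < cursor := fun s hs => hpair.2.2 s hs cursor (by simp)
        have hpost : (cursor :: post).Pairwise (· < ·) := hpair.2.1
        have hB : pvLoopB lines (pvSpans bs) rm repl (pre ++ cursor :: post) cursor acc
            = pvLoopB lines (pvSpans bs) rm repl post e
              (acc ++ PySem.List.slice lines (some cursor) (some cursor) ++
               (if rm.contains bidx then []
                else match List.lookup bidx repl with
                  | some r => r
                  | none => PySem.List.slice lines (some cursor) (some e))) := by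
          rw [pvLoopB_skip_lt lines (pvSpans bs) rm repl pre _ cursor acc hprelt]
          simp only [pvLoopB, if_neg (by omega : ¬ (cursor < cursor ∨ (lines.length : Int) ≤ cursor)),
            pvSpans_get?, hq, Option.map_some]
        have hslice0 : PySem.List.slice lines (some cursor) (some cursor) = ([] : List String) := by
          rw [PySem.List.slice_toNat _ h0 h0]; simp
        rw [hA, hB, hslice0]
        have haccs : (if rm.contains bidx then acc
               else match List.lookup bidx repl with
                 | some r => acc ++ r
                 | none => acc ++ PySem.List.slice lines (some cursor) (some e))
            = acc ++ [] ++ (if rm.contains bidx then []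
                else match List.lookup bidx repl with
                  | some r => r
                  | none => PySem.List.slice lines (some cursor) (some e)) := by
          by_cases hr : bidx ∈ rm
          · simp [hr]
          · cases hl : List.lookup bidx repl <;> simp [hr, hl]
        rw [haccs]
        apply ih e post _ (by omega)
        · exact hpost.of_cons
        · intro k hk
          exact hks k (by simp [hk])
        · intro k hk hek
          have hkin : k ∈ pre ++ cursor :: post := hcov k hk (by omega)
          have hkgt : cursor < k := by omega
          rcases List.mem_append.mp hkin with hkp | hkc
          · exact absurd (hprelt k hkp) (by omega)
          · rcases List.mem_cons.mp hkc with rfl | hkpost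
            · omega
            · exact hkpost
        · omega
      | none =>
        have hSc : (pvStarts bs).get? cursor = none := by
          rw [pvStarts_get?, hq]; rfl
        have hlt : cursor.toNat < lines.length := by omega
        have hcast : cursor = ((cursor.toNat : Nat) : Int) := by omega
        have hxget : PySem.List.pyGet? lines cursor = some lines[cursor.toNat] :=
          calc PySem.List.pyGet? lines cursor = lines[cursor.toNat]? := by
                conv_lhs => rw [hcast, PySem.List.pyGet?_natCast]
            _ = some lines[cursor.toNat] := List.getElem?_eq_getElem hlt
        have hA : pvLoopA lines (pvStarts bs) (pvEnds bs) rm repl (f+1) cursor acc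
            = pvLoopA lines (pvStarts bs) (pvEnds bs) rm repl f (cursor + 1)
                (acc ++ [lines[cursor.toNat]]) := by
          simp only [pvLoopA, hSc, hxget, if_pos hcn]
        rw [hA]
        rw [ih (cursor + 1) ks (acc ++ [lines[cursor.toNat]]) (by omega) hsorted hks
          (fun k hk hck => hcov k hk (by omega)) (by omega)]
        apply pvLoopB_advance lines (pvSpans bs) rm repl ks cursor acc _ h0 hcn
          (List.getElem?_eq_getElem hlt)
        intro s hs
        intro hcontra
        subst hcontra
        have := hks s hs
        rw [hq] at this
        simp at this
    · -- cursor past the end: A stops, B only skips then appends the empty tail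
      have hA : pvLoopA lines (pvStarts bs) (pvEnds bs) rm repl (f+1) cursor acc = acc := by
        simp only [pvLoopA, if_neg hcn]
      have hskip : ∀ s ∈ ks, s < cursor ∨ (lines.length : Int) ≤ s := by
        intro s hs
        by_cases h : s < cursor
        · exact Or.inl h
        · exact Or.inr (by omega)
      rw [hA, pvLoopB_skip lines (pvSpans bs) rm repl ks cursor acc hskip,
        PySem.List.slice_from _ h0]
      rw [List.drop_eq_nil_of_le (by omega)]
      simp

-- ===== VERDICT (by name: the statement is the Claim_ definition above) =====
theorem apply_block_changes_py_spec : Claim_equal_apply_block_changes_py := by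
  unfold Claim_equal_apply_block_changes_py
  intro rec_lines block_spans to_remove replacements _ hpre
  unfold Spec_apply_block_changes_py apply_block_changes_py apply_block_changes_py_alt
  have hnd : (PySem.List.sorted (pvSpans block_spans).keys (fun k => k) false).Nodup :=
    (PySem.List.sorted_perm _ _ _).nodup_iff.mpr (pvSpans_keys_nodup _)
  have hle : (PySem.List.sorted (pvSpans block_spans).keys (fun k => k) false).Pairwise
      (fun a b => (fun k : Int => k) a ≤ (fun k : Int => k) b) :=
    PySem.List.sorted_pairwise _ _
  have hlt : (PySem.List.sorted (pvSpans block_spans).keys (fun k => k) false).Pairwise (· < ·) :=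
    (hle.and hnd).imp (fun h => lt_of_le_of_ne h.1 h.2)
  apply pv_main rec_lines block_spans to_remove replacements hpre
    (rec_lines.length + 1) 0 _ [] le_rfl hlt
  · intro k hk
    rw [PySem.List.mem_sorted] at hk
    rw [pvSpans_keys_mem] at hk
    exact (pvFind_isSome_iff block_spans k).mpr hk
  · intro k hk _
    rw [PySem.List.mem_sorted, pvSpans_keys_mem]
    exact (pvFind_isSome_iff block_spans k).mp hk
  · omega
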